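-- pv_equiv track=rewrite | github.com/Kharim234/Tmag5170_spi_decoder | Tmag5170_spi_decoder.py | uintX_to_intX_represented_on_Y_bytes
-- ===== SOURCE A (Python) =====
-- def get_bit (value: int, i: int) -> int:
--     return (value >> i) & 0x01
--
-- def set_bit (bit_val: int, position: int) -> int:
--     return (bit_val << position)
--
-- def set_bit_in_value (bit_val: int, position: int, value: int) -> int:
--     return (set_bit(bit_val, position) | value)
--
-- def uintX_to_intX_represented_on_Y_bytes (in_value: int, size_of_in_value: int, out_bytes_count: int,) -> int:
--     int_val = None
--     if out_bytes_count > 0 and size_of_in_value > 0: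
--         value = in_value
--         sign_bit = get_bit(in_value, size_of_in_value - 1)
--         for i in range((size_of_in_value),(out_bytes_count * 8)):
--             value = set_bit_in_value(sign_bit, i, value)
--         byte_value = value.to_bytes(out_bytes_count, 'big')
--         int_val = int.from_bytes(byte_value, 'big', signed = True)
--     return (int_val)
-- ===== SOURCE B (Python) =====
-- def uintX_to_intX_represented_on_Y_bytes(in_value: int, size_of_in_value: int, out_bytes_count: int) -> int:
--     if out_bytes_count <= 0 or size_of_in_value <= 0:
--         return None
--     width = out_bytes_count * 8
--     value = in_value
--     if size_of_in_value < width and (in_value >> (size_of_in_value - 1)) & 1: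
--         value |= (1 << width) - (1 << size_of_in_value)
--     value &= (1 << width) - 1
--     return value - (1 << width) if value >= (1 << (width - 1)) else value
-- ===== Notes on version B (the rewrite author's own statement) =====
-- stated objective: faster
-- what changed: B replaces A's per-bit sign-extension loop over bits size..8*out-1 and the to_bytes/from_bytes round-trip by one precomputed all-ones mask OR plus an arithmetic signed reinterpretation of the low 8*out bits.
import Mathlib
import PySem

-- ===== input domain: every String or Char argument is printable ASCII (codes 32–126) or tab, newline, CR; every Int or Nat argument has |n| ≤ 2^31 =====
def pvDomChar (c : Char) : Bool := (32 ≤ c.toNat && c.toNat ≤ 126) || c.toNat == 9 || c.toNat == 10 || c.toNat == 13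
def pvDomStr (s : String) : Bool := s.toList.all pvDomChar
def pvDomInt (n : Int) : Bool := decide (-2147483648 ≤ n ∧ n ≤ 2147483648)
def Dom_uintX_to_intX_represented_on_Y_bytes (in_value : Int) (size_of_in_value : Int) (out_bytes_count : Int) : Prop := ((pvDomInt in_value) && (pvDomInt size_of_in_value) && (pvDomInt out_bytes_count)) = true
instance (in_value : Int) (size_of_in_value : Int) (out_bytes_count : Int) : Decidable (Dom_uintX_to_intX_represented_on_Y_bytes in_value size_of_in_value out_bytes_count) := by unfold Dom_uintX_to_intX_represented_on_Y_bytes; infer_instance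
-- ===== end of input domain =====

-- B replaces A's bit-by-bit sign-extension loop and bytes round-trip by one O(1) mask OR and
-- an arithmetic signed reinterpretation (objective: faster).


-- ===== PORT A =====
-- get_bit(value, i) = (value >> i) & 0x01 ; i ≥ 0 at the only call site (size_of_in_value > 0)
def pvGetBit (value : Int) (i : Int) : Int := PySem.Int.band (value >>> i.toNat) 1
-- set_bit(bit_val, position) = bit_val << position ; position ≥ 0 at every call site
def pvSetBit (bit_val : Int) (position : Int) : Int := bit_val <<< position.toNat
-- set_bit_in_value(bit_val, position, value) = set_bit(bit_val, position) | value
def pvSetBitInValue (bit_val : Int) (position : Int) (value : Int) : Int :=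
  PySem.Int.bor (pvSetBit bit_val position) value
-- hand port of value.to_bytes(n, 'big'): the big-endian byte list; exact for 0 ≤ value < 2^(8n)
-- (on any other value Python raises OverflowError — excluded by Pre_)
def pvToBytesBE (value : Int) (n : Nat) : List Int :=
  match n with
  | 0 => []
  | m + 1 => pvToBytesBE (value >>> 8) m ++ [PySem.Int.band value 255]
-- hand port of int.from_bytes(bs, 'big', signed=True): exact on byte lists (entries in 0..255):
-- the accumulated unsigned value is ≥ 2^(8·len−1) exactly when the sign bit (top bit of the
-- first byte) is set, in which case Python subtracts 2^(8·len)
def pvFromBytesBESigned (bs : List Int) : Int :=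
  let u := bs.foldl (fun acc b => acc * 256 + b) 0
  if 2 ^ (8 * bs.length - 1) ≤ u then u - 2 ^ (8 * bs.length) else u

def uintX_to_intX_represented_on_Y_bytes (in_value : Int) (size_of_in_value : Int) (out_bytes_count : Int) : Option Int :=
  if out_bytes_count > 0 ∧ size_of_in_value > 0 then
    let sign_bit := pvGetBit in_value (size_of_in_value - 1)
    let value := (PySem.List.pyRange size_of_in_value (out_bytes_count * 8)).foldl
      (fun value i => pvSetBitInValue sign_bit i value) in_value
    let byte_value := pvToBytesBE value out_bytes_count.toNat
    some (pvFromBytesBESigned byte_value)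
  else none

-- ===== PORT B =====
def uintX_to_intX_represented_on_Y_bytes_alt (in_value : Int) (size_of_in_value : Int) (out_bytes_count : Int) : Option Int :=
  if out_bytes_count ≤ 0 ∨ size_of_in_value ≤ 0 then none
  else
    let width := (out_bytes_count * 8).toNat
    let value :=
      if size_of_in_value < out_bytes_count * 8 ∧
          PySem.Int.band (in_value >>> (size_of_in_value - 1).toNat) 1 ≠ 0 then
        PySem.Int.bor in_value ((1 <<< width) - (1 <<< size_of_in_value.toNat))
      else in_value
    let value := PySem.Int.band value ((1 <<< width) - 1)
    some (if (1 <<< (width - 1)) ≤ value then value - (1 <<< width) else value)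

-- ===== PRECONDITION & SPEC =====
-- Pre_ excludes exactly the inputs on which A raises OverflowError in value.to_bytes
-- (in_value negative, or too large for out_bytes_count bytes); under Dom (|in_value| ≤ 2^31)
-- the disjunct '4 ≤ out_bytes_count' is equivalent to fitting, without a huge power.
def Pre_uintX_to_intX_represented_on_Y_bytes (in_value : Int) (size_of_in_value : Int) (out_bytes_count : Int) : Prop :=
  out_bytes_count ≤ 0 ∨ size_of_in_value ≤ 0 ∨
    (0 ≤ in_value ∧ (4 ≤ out_bytes_count ∨ in_value < 2 ^ (out_bytes_count * 8).toNat))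
instance (in_value : Int) (size_of_in_value : Int) (out_bytes_count : Int) : Decidable (Pre_uintX_to_intX_represented_on_Y_bytes in_value size_of_in_value out_bytes_count) := by unfold Pre_uintX_to_intX_represented_on_Y_bytes; infer_instance
def pvWitness_uintX_to_intX_represented_on_Y_bytes : Int × Int × Int := (143, 8, 2)

def Spec_uintX_to_intX_represented_on_Y_bytes (in_value : Int) (size_of_in_value : Int) (out_bytes_count : Int) (out : Option Int) : Prop := out = uintX_to_intX_represented_on_Y_bytes_alt in_value size_of_in_value out_bytes_count
instance (in_value : Int) (size_of_in_value : Int) (out_bytes_count : Int) (out : Option Int) : Decidable (Spec_uintX_to_intX_represented_on_Y_bytes in_value size_of_in_value out_bytes_count out) := by unfold Spec_uintX_to_intX_represented_on_Y_bytes; infer_instance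

-- ===== CLAIM (what is proved, stated in full; the proofs are below) =====
def Claim_equal_uintX_to_intX_represented_on_Y_bytes : Prop := ∀ (in_value : Int) (size_of_in_value : Int) (out_bytes_count : Int), Dom_uintX_to_intX_represented_on_Y_bytes in_value size_of_in_value out_bytes_count → Pre_uintX_to_intX_represented_on_Y_bytes in_value size_of_in_value out_bytes_count → Spec_uintX_to_intX_represented_on_Y_bytes in_value size_of_in_value out_bytes_count (uintX_to_intX_represented_on_Y_bytes in_value size_of_in_value out_bytes_count)
-- ===== LEMMAS AND PROOFS =====

-- A's sign-extension loop, on Nat data: ORing b<<i for i = s .. s+n-1 is one OR of b·(2^(s+n) − 2^s).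
theorem pv_loop_eq (n : Nat) : ∀ (s v b : Nat), b ≤ 1 →
    (PySem.List.pyRange (s : Int) ((s : Int) + (n : Int))).foldl
      (fun value i => pvSetBitInValue (b : Int) i value) (v : Int)
    = ((v ||| b * (2 ^ (s + n) - 2 ^ s) : Nat) : Int) := by
  induction n with
  | zero =>
    intro s v b hb
    rw [show ((s : Int) + ((0 : Nat) : Int)) = (s : Int) by push_cast; ring,
      PySem.List.pyRange_one_eq_nil le_rfl]
    simp
  | succ k ih =>
    intro s v b hb
    rw [PySem.List.pyRange_one_cons (by push_cast; omega)]
    simp only [List.foldl_cons]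
    have h1 : pvSetBitInValue (b : Int) (s : Int) (v : Int) = (((b <<< s) ||| v : Nat) : Int) := by
      simp only [pvSetBitInValue, pvSetBit, Int.toNat_natCast, ← Int.natCast_shiftLeft,
        PySem.Int.bor_natCast]
    rw [h1, show ((s : Int) + 1) = (((s + 1 : Nat)) : Int) by push_cast; ring,
      show ((s : Int) + ((k + 1 : Nat) : Int)) = (((s + 1 : Nat) : Int) + (k : Int)) by
        push_cast; ring,
      ih (s + 1) ((b <<< s) ||| v) b hb]
    congr 1
    interval_cases b
    · simp
    · have h2 : (1 : Nat) <<< s = 2 ^ s := by simp [Nat.shiftLeft_eq]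
      rw [h2, one_mul, one_mul, Nat.or_comm (2 ^ s) v, Nat.or_assoc]
      congr 1
      have hMul : 2 ^ (s + 1 + k) - 2 ^ (s + 1) = 2 ^ (s + 1) * (2 ^ k - 1) := by
        rw [Nat.mul_sub, pow_add, mul_one]
      have hOr : 2 ^ s ||| (2 ^ (s + 1) * (2 ^ k - 1)) = 2 ^ (s + 1) * (2 ^ k - 1) + 2 ^ s := by
        rw [Nat.or_comm]
        exact (Nat.two_pow_add_eq_or_of_lt
          (Nat.pow_lt_pow_right (by norm_num) (by omega)) _).symm
      rw [hMul, hOr, ← hMul]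
      have hle : (2 : Nat) ^ (s + 1) ≤ 2 ^ (s + 1 + k) :=
        Nat.pow_le_pow_right (by norm_num) (by omega)
      have hss : (2 : Nat) ^ (s + 1) = 2 * 2 ^ s := by rw [pow_succ]; ring
      have hkk : (2 : Nat) ^ (s + 1 + k) = 2 ^ (s + (k + 1)) := by
        rw [show s + 1 + k = s + (k + 1) by ring]
      omega

-- fold of the big-endian byte list reconstructs the value mod 2^(8n)
theorem pv_fold_toBytes (n : Nat) : ∀ (V : Nat) (a : Int),
    (pvToBytesBE (V : Int) n).foldl (fun acc b => acc * 256 + b) a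
    = a * 2 ^ (8 * n) + ((V % 2 ^ (8 * n) : Nat) : Int) := by
  induction n with
  | zero => intro V a; simp [pvToBytesBE]
  | succ m ih =>
    intro V a
    simp only [pvToBytesBE]
    rw [show ((V : Int) >>> (8 : Int)) = ((V >>> 8 : Nat) : Int) by
        rw [show (8 : Int) = ((8 : Nat) : Int) by norm_num, Int.shiftRight_natCast],
      show (255 : Int) = ((255 : Nat) : Int) by norm_num, PySem.Int.band_natCast,
      List.foldl_append, List.foldl_cons, List.foldl_nil, ih (V >>> 8) a]
    have hsr : V >>> 8 = V / 256 := by rw [Nat.shiftRight_eq_div_pow]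
    have hand : V &&& 255 = V % 256 := by
      have h := Nat.and_two_pow_sub_one_eq_mod V 8
      norm_num at h
      exact h
    have hmod : V % 2 ^ (8 * (m + 1)) = V % 256 + 256 * (V / 256 % 2 ^ (8 * m)) := by
      rw [show (2 : Nat) ^ (8 * (m + 1)) = 256 * 2 ^ (8 * m) by
        rw [show 8 * (m + 1) = 8 + 8 * m by ring, pow_add]; norm_num]
      exact Nat.mod_mul
    rw [hsr, hand, hmod,
      show (2 : Int) ^ (8 * (m + 1)) = 2 ^ (8 * m) * 256 by
        rw [show 8 * (m + 1) = 8 * m + 8 by ring, pow_add]; norm_num]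
    push_cast
    ring

theorem pv_length_toBytes (n : Nat) (x : Int) : (pvToBytesBE x n).length = n := by
  induction n generalizing x with
  | zero => rfl
  | succ m ih => simp [pvToBytesBE, ih]

-- ===== VERDICT (by name: the statement is the Claim_ definition above) =====
theorem uintX_to_intX_represented_on_Y_bytes_spec : Claim_equal_uintX_to_intX_represented_on_Y_bytes := by
  intro in_value size_of_in_value out_bytes_count hDom hPre
  unfold Spec_uintX_to_intX_represented_on_Y_bytes
  by_cases hc : out_bytes_count > 0 ∧ size_of_in_value > 0
  case neg =>
    unfold uintX_to_intX_represented_on_Y_bytes uintX_to_intX_represented_on_Y_bytes_alt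
    rw [if_neg hc, if_pos (by omega)]
  case pos =>
    obtain ⟨ho, hs⟩ := hc
    simp only [Dom_uintX_to_intX_represented_on_Y_bytes, pvDomInt, Bool.and_eq_true,
      decide_eq_true_eq] at hDom
    obtain ⟨⟨hD1, hD2⟩, hD3⟩ := hDom
    have h0 : 0 ≤ in_value := by rcases hPre with h | h | ⟨h0, _⟩ <;> omega
    have hfit : in_value < 2 ^ (out_bytes_count * 8).toNat := by
      rcases hPre with h | h | ⟨_, h4 | hlt⟩
      · omega
      · omega
      · have h32 : (32 : Nat) ≤ (out_bytes_count * 8).toNat := by omega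
        have hp : (2 : Int) ^ 32 ≤ 2 ^ (out_bytes_count * 8).toNat :=
          pow_le_pow_right₀ (by norm_num) h32
        have hval : (2 : Int) ^ 32 = 4294967296 := by norm_num
        omega
      · exact hlt
    obtain ⟨v, rfl⟩ := Int.eq_ofNat_of_zero_le h0
    obtain ⟨o, rfl⟩ := Int.eq_ofNat_of_zero_le (le_of_lt ho)
    obtain ⟨s, rfl⟩ := Int.eq_ofNat_of_zero_le (le_of_lt hs)
    have ho' : 0 < o := by exact_mod_cast ho
    have hs' : 0 < s := by exact_mod_cast hs
    have htoNat : ((o : Int) * 8).toNat = o * 8 := by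
      rw [show ((o : Int) * 8) = ((o * 8 : Nat) : Int) by push_cast; ring, Int.toNat_natCast]
    have hv : v < 2 ^ (o * 8) := by
      rw [htoNat] at hfit; exact_mod_cast hfit
    -- the sign bit, as a Nat b ≤ 1
    obtain ⟨b, hb, hsign⟩ : ∃ b : Nat, b ≤ 1 ∧ pvGetBit (v : Int) ((s : Int) - 1) = (b : Int) := by
      refine ⟨(v >>> (s - 1)) &&& 1, Nat.and_le_right, ?_⟩
      simp only [pvGetBit]
      rw [show ((s : Int) - 1) = ((s - 1 : Nat) : Int) by omega, Int.toNat_natCast,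
        ← Int.natCast_shiftRight, show (1 : Int) = ((1 : Nat) : Int) by norm_num,
        PySem.Int.band_natCast]
    have hsignB : PySem.Int.band ((v : Int) >>> (((s : Int) - 1)).toNat) 1 = (b : Int) := hsign
    -- the final unsigned value both programs hold before the signed reinterpretation
    have hVlt : (if s < o * 8 ∧ b = 1 then v ||| (2 ^ (o * 8) - 2 ^ s) else v) < 2 ^ (o * 8) := by
      split_ifs with h
      · exact Nat.or_lt_two_pow hv (Nat.sub_lt (Nat.two_pow_pos _) (Nat.two_pow_pos _))
      · exact hv
    -- A's sign-extension loop computes the same value as B's single mask OR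
    have hloop : (PySem.List.pyRange (s : Int) ((o : Int) * 8)).foldl
        (fun value i => pvSetBitInValue (b : Int) i value) (v : Int)
        = (((if s < o * 8 ∧ b = 1 then v ||| (2 ^ (o * 8) - 2 ^ s) else v) : Nat) : Int) := by
      by_cases hsw : s ≤ o * 8
      · rw [show ((o : Int) * 8) = ((s : Int) + ((o * 8 - s : Nat) : Int)) by omega,
          pv_loop_eq (o * 8 - s) s v b hb]
        congr 1
        rw [show s + (o * 8 - s) = o * 8 by omega]
        interval_cases b
        · simp
        · by_cases hlt : s < o * 8
          · rw [if_pos ⟨hlt, rfl⟩, one_mul]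
          · rw [if_neg (fun h => hlt h.1), show o * 8 = s by omega]
            simp
      · rw [PySem.List.pyRange_one_eq_nil (by omega)]
        rw [if_neg (fun h => hsw (le_of_lt h.1))]
        simp
    -- evaluate port A
    have hA : uintX_to_intX_represented_on_Y_bytes (v : Int) (s : Int) (o : Int)
        = some (if (2 : Int) ^ (o * 8 - 1)
              ≤ (((if s < o * 8 ∧ b = 1 then v ||| (2 ^ (o * 8) - 2 ^ s) else v) : Nat) : Int)
            then (((if s < o * 8 ∧ b = 1 then v ||| (2 ^ (o * 8) - 2 ^ s) else v) : Nat) : Int)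
              - 2 ^ (o * 8)
            else (((if s < o * 8 ∧ b = 1 then v ||| (2 ^ (o * 8) - 2 ^ s) else v) : Nat) : Int)) := by
      simp only [uintX_to_intX_represented_on_Y_bytes]
      rw [if_pos ⟨ho, hs⟩]
      simp only [hsign]
      rw [hloop, Int.toNat_natCast]
      simp only [pvFromBytesBESigned]
      rw [pv_length_toBytes, pv_fold_toBytes o _ 0, show 8 * o = o * 8 by ring,
        Nat.mod_eq_of_lt hVlt, zero_mul, zero_add]
    -- evaluate port B
    have hB : uintX_to_intX_represented_on_Y_bytes_alt (v : Int) (s : Int) (o : Int)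
        = some (if (2 : Int) ^ (o * 8 - 1)
              ≤ (((if s < o * 8 ∧ b = 1 then v ||| (2 ^ (o * 8) - 2 ^ s) else v) : Nat) : Int)
            then (((if s < o * 8 ∧ b = 1 then v ||| (2 ^ (o * 8) - 2 ^ s) else v) : Nat) : Int)
              - 2 ^ (o * 8)
            else (((if s < o * 8 ∧ b = 1 then v ||| (2 ^ (o * 8) - 2 ^ s) else v) : Nat) : Int)) := by
      simp only [uintX_to_intX_represented_on_Y_bytes_alt]
      rw [if_neg (by omega), htoNat, hsignB, Int.toNat_natCast]
      have hsh : ∀ k : Nat, (1 : Nat) <<< k = 2 ^ k := by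
        intro k; simp [Nat.shiftLeft_eq]
      have hone : (((2 : Nat) ^ (o * 8) : Nat) : Int) - 1 = (((2 : Nat) ^ (o * 8) - 1 : Nat) : Int) := by
        have : (1 : Nat) ≤ 2 ^ (o * 8) := Nat.one_le_two_pow
        push_cast [Nat.cast_sub this]
        ring
      by_cases hcb : s < o * 8 ∧ b = 1
      · rw [if_pos (show ((s : Int) < (o : Int) * 8 ∧ ((b : Nat) : Int) ≠ 0) from
          ⟨by exact_mod_cast hcb.1, by rw [hcb.2]; norm_num⟩)]
        have hsp : (2 : Nat) ^ s ≤ 2 ^ (o * 8) :=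
          Nat.pow_le_pow_right (by norm_num) (le_of_lt hcb.1)
        rw [hsh (o * 8), hsh s,
          show (((2 : Nat) ^ (o * 8) : Nat) : Int) - (((2 : Nat) ^ s : Nat) : Int)
              = (((2 : Nat) ^ (o * 8) - 2 ^ s : Nat) : Int) by push_cast [Nat.cast_sub hsp]; ring,
          PySem.Int.bor_natCast, hone, PySem.Int.band_natCast,
          Nat.and_two_pow_sub_one_eq_mod,
          Nat.mod_eq_of_lt (by rw [if_pos hcb] at hVlt; exact hVlt),
          hsh (o * 8 - 1), if_pos hcb]
        push_cast
        ring_nf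
      · rw [if_neg (show ¬((s : Int) < (o : Int) * 8 ∧ ((b : Nat) : Int) ≠ 0) from fun h =>
          hcb ⟨by exact_mod_cast h.1, by
            have hbne : b ≠ 0 := by exact_mod_cast h.2
            omega⟩)]
        rw [hsh (o * 8), hone, PySem.Int.band_natCast, Nat.and_two_pow_sub_one_eq_mod,
          Nat.mod_eq_of_lt hv, hsh (o * 8 - 1), if_neg hcb]
        push_cast
        ring_nf
    rw [hA, hB]
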